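-- pv_equiv track=rewrite | github.com/pabdan2003/circuit-sim | main.py | _qm_combine
-- ===== SOURCE A (Python) =====
-- def _qm_combine(a: str, b: str):
--     """Combina dos cubos si difieren en exactamente 1 bit; retorna el cubo
--     fusionado (con '-' en la posición que difería) o None."""
--     if len(a) != len(b):
--         return None
--     diff = 0
--     out = []
--     for x, y in zip(a, b):
--         if x != y:
--             diff += 1
--             if diff > 1:
--                 return None
--             out.append('-')
--         else:
--             out.append(x)
--     return ''.join(out) if diff == 1 else None
-- ===== SOURCE B (Python) =====
-- def _qm_combine(a: str, b: str):
--     if len(a) != len(b):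
--         return None
--     diffs = [i for i, (x, y) in enumerate(zip(a, b)) if x != y]
--     if len(diffs) == 1:
--         i = diffs[0]
--         return a[:i] + '-' + a[i + 1:]
--     return None
-- ===== Notes on version B (the rewrite author's own statement) =====
-- stated objective: simpler
-- what changed: Replaces the fused character-by-character accumulation with early exit by a two-phase decomposition: first collect all differing indices in one comprehension, then, only if there is exactly one, rebuild the result by slice-and-splice a[:i] + '-' + a[i+1:].
import Mathlib
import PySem

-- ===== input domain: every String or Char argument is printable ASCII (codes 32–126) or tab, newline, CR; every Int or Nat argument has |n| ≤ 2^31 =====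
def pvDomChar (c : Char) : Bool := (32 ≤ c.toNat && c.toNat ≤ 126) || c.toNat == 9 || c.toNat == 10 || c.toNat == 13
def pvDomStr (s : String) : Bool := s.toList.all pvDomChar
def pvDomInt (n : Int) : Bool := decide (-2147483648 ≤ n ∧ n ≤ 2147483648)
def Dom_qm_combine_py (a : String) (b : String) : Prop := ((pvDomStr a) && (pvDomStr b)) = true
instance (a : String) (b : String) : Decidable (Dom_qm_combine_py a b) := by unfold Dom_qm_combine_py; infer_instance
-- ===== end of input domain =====

-- B separates detection (list of differing indices) from construction (slice-and-splice),
-- replacing A's fused single-pass accumulation with early exit; same O(n) cost, simpler decomposition.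

-- ===== PORT A =====
-- the for-loop over zip(a,b) with state (diff, out); 'return None' inside the loop = none
def qmALoop : List (Char × Char) → Nat → List Char → Option (Nat × List Char)
  | [], diff, out => some (diff, out)
  | (x, y) :: rest, diff, out =>
    if x != y then
      if diff + 1 > 1 then none
      else qmALoop rest (diff + 1) (out ++ ['-'])
    else qmALoop rest diff (out ++ [x])

def qm_combine_py (a : String) (b : String) : Option String :=
  let la := a.toList
  let lb := b.toList
  if la.length ≠ lb.length then none
  else
    match qmALoop (la.zip lb) 0 [] with
    | none => none
    | some (diff, out) =>
      -- ''.join(out) on the accumulated characters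
      if diff == 1 then some (String.ofList out) else none

-- ===== PORT B =====
def qm_combine_py_alt (a : String) (b : String) : Option String :=
  let la := a.toList
  let lb := b.toList
  if la.length ≠ lb.length then none
  else
    -- diffs = [i for i, (x, y) in enumerate(zip(a, b)) if x != y]
    let diffs := ((PySem.List.enumerate (la.zip lb) 0).filter (fun p => p.2.1 != p.2.2)).map (·.1)
    -- if len(diffs) == 1: i = diffs[0]; return a[:i] + '-' + a[i+1:]
    match diffs with
    | [i] => some (String.ofList (PySem.List.slice la none (some i) ++ '-' :: PySem.List.slice la (some (i + 1)) none))
    | _ => none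

-- ===== PRECONDITION & SPEC =====
def Spec_qm_combine_py (a : String) (b : String) (out : Option String) : Prop := out = qm_combine_py_alt a b
instance (a : String) (b : String) (out : Option String) : Decidable (Spec_qm_combine_py a b out) := by unfold Spec_qm_combine_py; infer_instance

-- ===== CLAIM (what is proved, stated in full; the proofs are below) =====
def Claim_equal_qm_combine_py : Prop := ∀ (a : String) (b : String), Dom_qm_combine_py a b → Spec_qm_combine_py a b (qm_combine_py a b)

-- ===== LEMMAS AND PROOFS =====

-- the list of differing indices, as B computes it (enumerate from 0)
def pvDiffs (l : List (Char × Char)) : List Int :=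
  ((PySem.List.enumerate l 0).filter (fun p => p.2.1 != p.2.2)).map (·.1)

-- A's loop result, postprocessed as A does after the loop (as a list of characters)
def pvPostA (l : List (Char × Char)) (out : List Char) : Option (List Char) :=
  match qmALoop l 0 out with
  | none => none
  | some (diff, o) => if diff == 1 then some o else none

lemma pvDiffs_shift (l : List (Char × Char)) (s : Int) :
    ((PySem.List.enumerate l s).filter (fun p => p.2.1 != p.2.2)).map (·.1)
      = (pvDiffs l).map (· + s) := by
  induction l generalizing s with
  | nil => simp [pvDiffs, PySem.List.enumerate_nil]
  | cons p rest ih =>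
    obtain ⟨x, y⟩ := p
    simp only [pvDiffs, PySem.List.enumerate_cons, List.filter_cons, zero_add]
    by_cases h : (x != y) = true
    · simp only [h, if_true, List.map_cons]
      rw [ih (s + 1), ih 1]
      simp only [List.map_map, zero_add]
      refine congrArg₂ _ rfl ?_
      refine congrArg₂ _ ?_ rfl
      funext z; simp [Function.comp]; ring
    · simp only [h, Bool.false_eq_true, reduceIte]
      rw [ih (s + 1), ih 1]
      simp only [List.map_map]
      refine congrArg₂ _ ?_ rfl
      funext z; simp [Function.comp]; ring

lemma pvDiffs_cons_ne (x y : Char) (rest : List (Char × Char)) (h : x ≠ y) :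
    pvDiffs ((x, y) :: rest) = 0 :: (pvDiffs rest).map (· + 1) := by
  simp [pvDiffs, PySem.List.enumerate_cons, h, pvDiffs_shift rest 1]

lemma pvDiffs_cons_eq (x : Char) (rest : List (Char × Char)) :
    pvDiffs ((x, x) :: rest) = (pvDiffs rest).map (· + 1) := by
  simp [pvDiffs, PySem.List.enumerate_cons, pvDiffs_shift rest 1]

lemma pvDiffs_nonneg (l : List (Char × Char)) : ∀ i ∈ pvDiffs l, 0 ≤ i := by
  induction l with
  | nil => simp [pvDiffs, PySem.List.enumerate_nil]
  | cons p rest ih =>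
    obtain ⟨x, y⟩ := p
    intro i hi
    by_cases h : x = y
    · subst h
      rw [pvDiffs_cons_eq] at hi
      simp only [List.mem_map] at hi
      obtain ⟨j, hj, rfl⟩ := hi
      have := ih j hj; omega
    · rw [pvDiffs_cons_ne _ _ _ h] at hi
      simp only [List.mem_cons, List.mem_map] at hi
      rcases hi with rfl | ⟨j, hj, rfl⟩
      · omega
      · have := ih j hj; omega

lemma pvDiffs_nil_iff (l : List (Char × Char)) :
    pvDiffs l = [] ↔ l.all (fun p => p.1 == p.2) = true := by
  induction l with
  | nil => simp [pvDiffs, PySem.List.enumerate_nil]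
  | cons p rest ih =>
    obtain ⟨x, y⟩ := p
    by_cases h : x = y
    · subst h
      rw [pvDiffs_cons_eq]
      simp [ih]
    · rw [pvDiffs_cons_ne _ _ _ h]
      simp [h]

-- A's loop once diff = 1: succeeds iff no more differences, appending the first components
lemma qmALoop_one (l : List (Char × Char)) (out : List Char) :
    qmALoop l 1 out =
      if l.all (fun p => p.1 == p.2) then some (1, out ++ l.map Prod.fst) else none := by
  induction l generalizing out with
  | nil => simp [qmALoop]
  | cons p rest ih =>
    obtain ⟨x, y⟩ := p
    by_cases h : x = y
    · subst h
      simp [qmALoop, ih, List.append_assoc]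
    · simp [qmALoop, h]

-- the splice B builds, expressed on the first components
def pvSplice (cs : List Char) (i : Int) : List Char :=
  cs.take i.toNat ++ '-' :: cs.drop (i.toNat + 1)

-- main invariant: A's postprocessed loop result = B's branch on the diff-index list
lemma qm_main (l : List (Char × Char)) (out : List Char) :
    pvPostA l out
      = (match pvDiffs l with
         | [i] => some (out ++ pvSplice (l.map Prod.fst) i)
         | _ => (none : Option (List Char))) := by
  induction l generalizing out with
  | nil => simp [pvPostA, qmALoop, pvDiffs, PySem.List.enumerate_nil]
  | cons p rest ih =>
    obtain ⟨x, y⟩ := p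
    by_cases h : x = y
    · subst h
      rw [pvDiffs_cons_eq]
      have hrec : pvPostA ((x, x) :: rest) out = pvPostA rest (out ++ [x]) := by
        simp [pvPostA, qmALoop]
      rw [hrec, ih]
      rcases hd : pvDiffs rest with _ | ⟨j, _ | _⟩
      · simp
      · have hj : 0 ≤ j := pvDiffs_nonneg rest j (by simp [hd])
        have ht : (j + 1).toNat = j.toNat + 1 := by omega
        simp [pvSplice, ht, List.append_assoc]
      · simp
    · rw [pvDiffs_cons_ne _ _ _ h]
      have hrec : pvPostA ((x, y) :: rest) out =
          match qmALoop rest 1 (out ++ ['-']) with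
          | none => none
          | some (diff, o) => if diff == 1 then some o else none := by
        simp [pvPostA, qmALoop, h]
      rw [hrec, qmALoop_one]
      by_cases hall : rest.all (fun p => p.1 == p.2) = true
      · have h0 : pvDiffs rest = [] := (pvDiffs_nil_iff rest).mpr hall
        simp [hall, h0, pvSplice, List.append_assoc]
      · have h0 : pvDiffs rest ≠ [] := fun hc => hall ((pvDiffs_nil_iff rest).mp hc)
        rcases hd : pvDiffs rest with _ | ⟨j, js⟩
        · exact absurd hd h0
        · simp [hall]

-- ===== VERDICT (by name: the statement is the Claim_ definition above) =====
theorem qm_combine_py_spec : Claim_equal_qm_combine_py := by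
  intro a b _
  unfold Spec_qm_combine_py qm_combine_py qm_combine_py_alt
  by_cases hlen : a.toList.length = b.toList.length
  · rw [if_neg (not_not_intro hlen), if_neg (not_not_intro hlen)]
    have hfst : (a.toList.zip b.toList).map Prod.fst = a.toList :=
      List.map_fst_zip (le_of_eq hlen)
    have hmain := qm_main (a.toList.zip b.toList) []
    have hL : (match qmALoop (a.toList.zip b.toList) 0 [] with
        | none => none
        | some (diff, out) => if diff == 1 then some (String.ofList out) else none)
        = (pvPostA (a.toList.zip b.toList) []).map String.ofList := by
      unfold pvPostA
      rcases qmALoop (a.toList.zip b.toList) 0 [] with _ | ⟨d, o⟩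
      · rfl
      · by_cases hd : d == 1 <;> simp [hd]
    rw [hL, hmain, hfst]
    rcases hd : pvDiffs (a.toList.zip b.toList) with _ | ⟨i, _ | _⟩ <;>
      rw [show ((PySem.List.enumerate (a.toList.zip b.toList) 0).filter
            (fun p => p.2.1 != p.2.2)).map (·.1) = pvDiffs (a.toList.zip b.toList) from rfl, hd]
    · rfl
    · have hi : 0 ≤ i := pvDiffs_nonneg _ i (by rw [hd]; exact List.mem_singleton.mpr rfl)
      dsimp only
      rw [PySem.List.slice_to _ hi, PySem.List.slice_from _ (by omega : (0:Int) ≤ i + 1)]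
      rw [show (i + 1).toNat = i.toNat + 1 by omega]
      simp only [pvSplice, List.nil_append, Option.map_some]
    · rfl
  · rw [if_pos hlen, if_pos hlen]
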